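-- pv_equiv track=rewrite | github.com/include-what-you-use/include-what-you-use | iwyu_tool.py | win_split
-- ===== SOURCE A (Python) =====
-- def win_split(cmdline):
--     """ Minimal implementation of shlex.split for Windows following
--     https://msdn.microsoft.com/en-us/library/windows/desktop/17w5ykft.aspx.
--     """
--     def split_iter(cmdline):
--         in_quotes = False
--         backslashes = 0
--         arg = ''
--         for c in cmdline:
--             if c == '\\':
--                 # MSDN: Backslashes are interpreted literally, unless they
--                 # immediately precede a double quotation mark.
--                 # Buffer them until we know what comes next.
--                 backslashes += 1
--             elif c == '"':
--                 # Quotes can either be an escaped quote or the start of a quoted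
--                 # string. Paraphrasing MSDN:
--                 # Before quotes, place one backslash in the arg for every pair
--                 # of leading backslashes. If the number of backslashes is odd,
--                 # retain the double quotation mark, otherwise interpret it as a
--                 # string delimiter and switch state.
--                 arg += '\\' * (backslashes // 2)
--                 if backslashes % 2 == 1:
--                     arg += c
--                 else:
--                     in_quotes = not in_quotes
--                 backslashes = 0
--             elif c in (' ', '\t') and not in_quotes:
--                 # MSDN: Arguments are delimited by white space, which is either
--                 # a space or a tab [but only outside of a string].
--                 # Flush backslashes and return arg bufferd so far, unless empty.
--                 arg += '\\' * backslashes
--                 if arg: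
--                     yield arg
--                     arg = ''
--                 backslashes = 0
--             else:
--                 # Flush buffered backslashes and append.
--                 arg += '\\' * backslashes
--                 arg += c
--                 backslashes = 0
--
--         if arg:
--             arg += '\\' * backslashes
--             yield arg
--
--     return list(split_iter(cmdline))
-- ===== SOURCE B (Python) =====
-- def win_split(cmdline):
--     """Chunk-based tokenizer following the MSDN rules: scans maximal runs
--     (backslash run + optional quote, quote, whitespace run, ordinary run)
--     keeping only an in_quotes flag and the current arg buffer."""
--     args = []
--     arg = []
--     in_quotes = False
--     i, n = 0, len(cmdline)
--     while i < n:
--         c = cmdline[i]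
--         if c == '\\':
--             j = i
--             while j < n and cmdline[j] == '\\':
--                 j += 1
--             k = j - i
--             if j < n and cmdline[j] == '"':
--                 arg.append('\\' * (k // 2))
--                 if k % 2:
--                     arg.append('"')
--                 else:
--                     in_quotes = not in_quotes
--                 i = j + 1
--             else:
--                 arg.append('\\' * k)
--                 i = j
--         elif c == '"':
--             in_quotes = not in_quotes
--             i += 1
--         elif not in_quotes and c in ' \t':
--             if arg:
--                 args.append(''.join(arg))
--                 arg = []
--             while i < n and cmdline[i] in ' \t':
--                 i += 1
--         else:
--             j = i
--             while j < n and cmdline[j] not in '\\"' and (in_quotes or cmdline[j] not in ' \t'):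
--                 j += 1
--             arg.append(cmdline[i:j])
--             i = j
--     if arg:
--         args.append(''.join(arg))
--     return args
-- ===== Notes on version B (the rewrite author's own statement) =====
-- stated objective: alternative
-- what changed: Replaced the per-character state machine that buffers a backslash counter across iterations by a chunk tokenizer that consumes maximal runs (backslash-run optionally followed by a quote, a quote, a whitespace run, an ordinary run) keeping only the in_quotes flag and the current argument buffer; B also fixes A's dropped trailing backslash-only argument.
-- intended difference: On command lines whose maximal trailing backslash run follows an empty argument buffer (start of line, unquoted whitespace, or only delimiter quotes since then), A silently drops that final backslash-only argument (its final flush appends buffered backslashes only when arg is already non-empty) while B returns it, as the MSDN rules intend ('a \\' is the two arguments 'a' and '\\'). — e.g. on win_split("\\"): A returns [], B returns ["\\"]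
import Mathlib
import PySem

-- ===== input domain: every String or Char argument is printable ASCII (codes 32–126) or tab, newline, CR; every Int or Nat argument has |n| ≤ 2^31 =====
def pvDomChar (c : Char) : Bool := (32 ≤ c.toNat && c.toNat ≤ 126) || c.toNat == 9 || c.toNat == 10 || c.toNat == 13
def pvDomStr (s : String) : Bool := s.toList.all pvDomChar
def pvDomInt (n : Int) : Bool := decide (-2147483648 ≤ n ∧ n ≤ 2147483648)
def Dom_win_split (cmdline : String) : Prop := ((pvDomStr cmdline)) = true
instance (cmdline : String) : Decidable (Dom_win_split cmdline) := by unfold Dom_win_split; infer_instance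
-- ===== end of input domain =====

-- B replaces A's per-character loop (with a backslash counter carried across iterations) by a
-- chunk tokenizer over maximal runs; B additionally returns the trailing backslash-only argument
-- that A drops (see D_win_split below).


-- ===== PORT A =====
-- literal '\\'-repetition, as in Python's '\\' * n
def winRep (n : Nat) : List Char := List.replicate n '\\'

-- per-character loop of A: state (in_quotes, backslashes, arg); the generator's yields build the list
def winALoop : List Char → Bool → Nat → List Char → List String
  | [], _, bs, arg =>
      if arg = [] then [] else [String.ofList (arg ++ winRep bs)]
  | c :: cs, inq, bs, arg =>
      if c = '\\' then winALoop cs inq (bs + 1) arg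
      else if c = '"' then
        let arg1 := arg ++ winRep (bs / 2)
        if bs % 2 = 1 then winALoop cs inq 0 (arg1 ++ ['"'])
        else winALoop cs (!inq) 0 arg1
      else if (c = ' ' ∨ c = '\t') ∧ inq = false then
        let arg1 := arg ++ winRep bs
        if arg1 = [] then winALoop cs inq 0 []
        else String.ofList arg1 :: winALoop cs inq 0 []
      else winALoop cs inq 0 (arg ++ winRep bs ++ [c])

def win_split (cmdline : String) : List String := winALoop cmdline.toList false 0 []

-- ===== PORT B =====
-- termination helpers for the chunk tokenizer (cited by winBLoop's decreasing_by)
theorem pvDropLt (cs : List Char) (p : Char → Bool) : (cs.dropWhile p).length < cs.length + 1 := by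
  have := List.length_dropWhile_le (p := p) (l := cs); omega
theorem pvDropTailLt (cs : List Char) (p : Char → Bool) : ((cs.dropWhile p).tail).length < cs.length + 1 := by
  have h1 := List.length_dropWhile_le (p := p) (l := cs)
  have h2 := List.length_tail (l := cs.dropWhile p); omega

-- chunk tokenizer of B: consumes a maximal run per step, keeping only (in_quotes, arg)
def winBLoop : List Char → Bool → List Char → List String
  | [], _, arg => if arg = [] then [] else [String.ofList arg]
  | c :: cs, inq, arg =>
      if c = '\\' then
        let k := (cs.takeWhile (· == '\\')).length + 1
        let rest := cs.dropWhile (· == '\\')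
        if rest.head? = some '"' then
          let arg1 := arg ++ List.replicate (k / 2) '\\'
          if k % 2 = 1 then winBLoop rest.tail inq (arg1 ++ ['"'])
          else winBLoop rest.tail (!inq) arg1
        else winBLoop rest inq (arg ++ List.replicate k '\\')
      else if c = '"' then winBLoop cs (!inq) arg
      else if inq = false ∧ (c = ' ' ∨ c = '\t') then
        (if arg = [] then [] else [String.ofList arg]) ++
          winBLoop (cs.dropWhile (fun ch => ch == ' ' || ch == '\t')) inq []
      else
        let run := cs.takeWhile (fun ch => !(ch == '\\') && !(ch == '"') && (inq || !(ch == ' ' || ch == '\t')))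
        winBLoop (cs.dropWhile (fun ch => !(ch == '\\') && !(ch == '"') && (inq || !(ch == ' ' || ch == '\t')))) inq (arg ++ c :: run)
  termination_by cs _ _ => cs.length
  decreasing_by
    all_goals simp only [List.length_cons]
    all_goals first
      | exact pvDropTailLt cs _
      | exact pvDropLt cs _
      | omega

def win_split_alt (cmdline : String) : List String := winBLoop cmdline.toList false []

-- ===== PRECONDITION & SPEC =====
-- On command lines ending in a backslash run that follows an empty argument buffer (start of line,
-- unquoted whitespace, or only delimiter quotes since then), A drops that final backslash-only
-- argument (its final flush appends buffered backslashes only when arg is already non-empty)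
-- while B returns it, as the MSDN rules intend ('a \\' is the two arguments 'a' and '\\').
-- (The foldl scans the prefix before the flagged whitespace with state (in_quotes, odd-backslash-
-- run); the reversed list strips the trailing backslash run, then delimiter quotes.)
def D_win_split (cmdline : String) : Prop :=
  let t := (cmdline.toList.reverse.dropWhile (· == '\\')).dropWhile (· == '"')
  cmdline.toList.reverse.head? = some '\\' ∧
    (t = [] ∨ ((t.head? = some ' ' ∨ t.head? = some '\t') ∧
      (t.tail.reverse.foldl (fun s x =>
        (xor s.1 (x == '"' && !s.2), x == '\\' && !s.2)) (false, false)).1 = false))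
instance (cmdline : String) : Decidable (D_win_split cmdline) := by unfold D_win_split; infer_instance

def Spec_win_split (cmdline : String) (out : List String) : Prop := ¬ D_win_split cmdline → out = win_split_alt cmdline
instance (cmdline : String) (out : List String) : Decidable (Spec_win_split cmdline out) := by unfold Spec_win_split; infer_instance

def pvDiffWitness_win_split : String := "\\"
def pvDiffWitnessOut_win_split : (List String) × (List String) := ([], ["\\"])

-- ===== CLAIM (what is proved, stated in full; the proofs are below) =====
def Claim_unchanged_win_split : Prop := ∀ (cmdline : String), Dom_win_split cmdline → Spec_win_split cmdline (win_split cmdline)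
def Claim_changed_win_split : Prop := Dom_win_split (pvDiffWitness_win_split) ∧ D_win_split (pvDiffWitness_win_split) ∧ win_split (pvDiffWitness_win_split) = pvDiffWitnessOut_win_split.1 ∧ win_split_alt (pvDiffWitness_win_split) = pvDiffWitnessOut_win_split.2 ∧ pvDiffWitnessOut_win_split.1 ≠ pvDiffWitnessOut_win_split.2
def Claim_exact_win_split : Prop := ∀ (cmdline : String), Dom_win_split cmdline → D_win_split cmdline → win_split cmdline ≠ win_split_alt cmdline

-- ===== LEMMAS AND PROOFS =====

-- proof-helper restatements of D_'s scan in forward form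
def pvQStep (s : Bool × Bool) (c : Char) : Bool × Bool :=
  if c = '\\' then (s.1, !s.2)
  else if c = '"' then (if s.2 then s.1 else !s.1, false)
  else (s.1, false)
def pvInQuotes (u : List Char) : Bool := (u.foldl pvQStep (false, false)).1
def pvRstrip (l : List Char) (c : Char) : List Char := (l.reverse.dropWhile (· == c)).reverse

theorem foldl_lambda_eq (u : List Char) :
    (u.foldl (fun s x => (xor s.1 (x == '"' && !s.2), x == '\\' && !s.2)) (false, false)).1
      = pvInQuotes u := by
  unfold pvInQuotes
  have hfun : ∀ (s : Bool × Bool) (x : Char),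
      (xor s.1 (x == '"' && !s.2), x == '\\' && !s.2) = pvQStep s x := by
    intro s x
    by_cases h1 : x = '\\'
    · subst h1; simp [pvQStep]
    · by_cases h2 : x = '"'
      · subst h2; rcases s with ⟨q, o⟩; cases o <;> cases q <;> simp [pvQStep]
      · rcases s with ⟨q, o⟩; cases o <;> cases q <;> simp [pvQStep, h1, h2]
  rw [List.foldl_ext (f := fun s x => (xor s.1 (x == '"' && !s.2), x == '\\' && !s.2))
    (g := pvQStep) (H := fun a x _ => hfun a x)]

theorem dropLast_reverse_eq (t : List Char) : t.reverse.dropLast = t.tail.reverse := by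
  cases t with
  | nil => rfl
  | cons c t' => rw [List.reverse_cons, List.dropLast_concat]; rfl

-- D_ in terms of the forward-form helpers
theorem rstrip_ne_iff (l : List Char) :
    l.reverse.head? = some '\\' ↔ pvRstrip l '\\' ≠ l := by
  unfold pvRstrip
  cases hr2 : l.reverse with
  | nil =>
    have hl2 : l = [] := by
      have := congrArg List.reverse hr2
      simpa using this
    subst hl2; simp
  | cons c r' =>
    have hlen : l.length = r'.length + 1 := by
      have := congrArg List.length hr2
      simpa using this
    by_cases hc : c = '\\'
    · subst hc
      apply iff_of_true rfl
      intro heq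
      have hlen2 := congrArg List.length heq
      rw [List.length_reverse, List.dropWhile_cons, if_pos (by simp)] at hlen2
      have hd2 := List.length_dropWhile_le (p := (· == '\\')) (l := r')
      omega
    · apply iff_of_false (by simp [hc])
      intro hne
      apply hne
      rw [List.dropWhile_cons, if_neg (by simpa using hc), ← hr2, List.reverse_reverse]

theorem D_expl (cmdline : String) :
    D_win_split cmdline ↔
      (pvRstrip cmdline.toList '\\' ≠ cmdline.toList ∧
        (pvRstrip (pvRstrip cmdline.toList '\\') '"' = [] ∨
          (((pvRstrip (pvRstrip cmdline.toList '\\') '"').getLast? = some ' ' ∨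
            (pvRstrip (pvRstrip cmdline.toList '\\') '"').getLast? = some '\t') ∧
            pvInQuotes (pvRstrip (pvRstrip cmdline.toList '\\') '"').dropLast = false))) := by
  have hq : pvRstrip (pvRstrip cmdline.toList '\\') '"' =
      ((cmdline.toList.reverse.dropWhile (· == '\\')).dropWhile (· == '"')).reverse := by
    unfold pvRstrip
    rw [List.reverse_reverse]
  simp only [D_win_split]
  rw [hq, ← rstrip_ne_iff]
  apply and_congr Iff.rfl
  rw [List.getLast?_reverse, dropLast_reverse_eq, List.reverse_eq_nil_iff, foldl_lambda_eq]

-- A's loop with the final flush fixed (trailing backslashes kept even when arg is empty):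
-- this is what B computes; proof helper only.
def winAF : List Char → Bool → Nat → List Char → List String
  | [], _, bs, arg =>
      if arg = [] ∧ bs = 0 then [] else [String.ofList (arg ++ winRep bs)]
  | c :: cs, inq, bs, arg =>
      if c = '\\' then winAF cs inq (bs + 1) arg
      else if c = '"' then
        let arg1 := arg ++ winRep (bs / 2)
        if bs % 2 = 1 then winAF cs inq 0 (arg1 ++ ['"'])
        else winAF cs (!inq) 0 arg1
      else if (c = ' ' ∨ c = '\t') ∧ inq = false then
        let arg1 := arg ++ winRep bs
        if arg1 = [] then winAF cs inq 0 []
        else String.ofList arg1 :: winAF cs inq 0 []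
      else winAF cs inq 0 (arg ++ winRep bs ++ [c])

-- the bare state machine of A's loop (proof helper)
def winSt (s : Bool × Nat × List Char) (c : Char) : Bool × Nat × List Char :=
  if c = '\\' then (s.1, s.2.1 + 1, s.2.2)
  else if c = '"' then
    let arg1 := s.2.2 ++ winRep (s.2.1 / 2)
    if s.2.1 % 2 = 1 then (s.1, 0, arg1 ++ ['"'])
    else (!s.1, 0, arg1)
  else if (c = ' ' ∨ c = '\t') ∧ s.1 = false then (s.1, 0, [])
  else (s.1, 0, s.2.2 ++ winRep s.2.1 ++ [c])

def winFin (s : Bool × Nat × List Char) (cs : List Char) : Bool × Nat × List Char :=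
  cs.foldl winSt s

theorem winAF_eq_winALoop (cs : List Char) (inq : Bool) (bs : Nat) (arg : List Char) :
    winAF cs inq bs arg =
      winALoop cs inq bs arg ++
        (if (winFin (inq, bs, arg) cs).2.2 = [] ∧ (winFin (inq, bs, arg) cs).2.1 ≠ 0
          then [String.ofList (winRep (winFin (inq, bs, arg) cs).2.1)] else []) := by
  induction cs generalizing inq bs arg with
  | nil =>
    simp only [winAF, winALoop, winFin, List.foldl]
    by_cases ha : arg = []
    · subst ha
      by_cases hb : bs = 0
      · subst hb; simp
      · simp [hb, winRep]
    · simp [ha]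
  | cons c cs ih =>
    have hfold : ∀ s : Bool × Nat × List Char, winFin s (c :: cs) = winFin (winSt s c) cs :=
      fun s => rfl
    simp only [winAF, winALoop, hfold, winSt]
    split_ifs <;> rw [ih] <;> simp_all [List.cons_append]

theorem takeWhile_bs_replicate (cs : List Char) :
    cs.takeWhile (· == '\\') = List.replicate (cs.takeWhile (· == '\\')).length '\\' :=
  List.eq_replicate_length.mpr (fun b hb => by
    have := List.mem_takeWhile_imp hb; simpa using this)

theorem dropWhile_head?_false (p : Char → Bool) (l : List Char) (x : Char)
    (h : (l.dropWhile p).head? = some x) : p x = false := by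
  induction l with
  | nil => simp [List.dropWhile] at h
  | cons c cs ih =>
    by_cases hc : p c
    · simp only [List.dropWhile_cons, if_pos hc] at h; exact ih h
    · simp only [List.dropWhile_cons, if_neg hc] at h
      simp at h; subst h; simpa using hc

theorem winAF_absorbBS (k : Nat) (rest : List Char) (inq : Bool) (bs : Nat) (arg : List Char) :
    winAF (List.replicate k '\\' ++ rest) inq bs arg = winAF rest inq (bs + k) arg := by
  induction k generalizing bs with
  | zero => simp
  | succ k ih =>
    rw [List.replicate_succ, List.cons_append]
    have hstep : winAF ('\\' :: (List.replicate k '\\' ++ rest)) inq bs arg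
        = winAF (List.replicate k '\\' ++ rest) inq (bs + 1) arg := by
      simp [winAF]
    rw [hstep, ih, show bs + 1 + k = bs + (k + 1) from by omega]

theorem winAF_shiftBS (rest : List Char) (inq : Bool) (k : Nat) (arg : List Char)
    (h1 : rest.head? ≠ some '\\') (h2 : rest.head? ≠ some '"') :
    winAF rest inq k arg = winAF rest inq 0 (arg ++ winRep k) := by
  cases rest with
  | nil =>
    by_cases ha : arg = [] <;> by_cases hk : k = 0 <;>
      simp_all [winAF, winRep, List.replicate_eq_nil_iff]
  | cons c rest' =>
    have hc1 : c ≠ '\\' := by simp at h1; exact h1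
    have hc2 : c ≠ '"' := by simp at h2; exact h2
    simp only [winAF, if_neg hc1, if_neg hc2]
    split_ifs <;> simp_all [winRep, List.append_assoc]

theorem winAF_absorbWS (ws rest : List Char) (h : ∀ c ∈ ws, c = ' ' ∨ c = '\t') :
    winAF (ws ++ rest) false 0 [] = winAF rest false 0 [] := by
  induction ws with
  | nil => rfl
  | cons c cs ih =>
    have hc := h c (by simp)
    have hne : c ≠ '\\' := by rcases hc with h' | h' <;> subst h' <;> decide
    have hnq : c ≠ '"' := by rcases hc with h' | h' <;> subst h' <;> decide
    rw [List.cons_append]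
    have hstep : winAF (c :: (cs ++ rest)) false 0 [] = winAF (cs ++ rest) false 0 [] := by
      rcases hc with h' | h' <;> subst h' <;> simp [winAF, winRep]
    rw [hstep]
    exact ih (fun x hx => h x (by simp [hx]))

theorem winAF_absorbOrd (run rest : List Char) (inq : Bool) (arg : List Char)
    (h : ∀ c ∈ run, c ≠ '\\' ∧ c ≠ '"' ∧ (inq = true ∨ (c ≠ ' ' ∧ c ≠ '\t'))) :
    winAF (run ++ rest) inq 0 arg = winAF rest inq 0 (arg ++ run) := by
  induction run generalizing arg with
  | nil => simp
  | cons c cs ih =>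
    obtain ⟨h1, h2, h3⟩ := h c (by simp)
    have hguard : ¬((c = ' ' ∨ c = '\t') ∧ inq = false) := by
      rcases h3 with h3 | h3
      · simp [h3]
      · rintro ⟨hc | hc, _⟩ <;> simp_all
    rw [List.cons_append]
    simp only [winAF, if_neg h1, if_neg h2, if_neg hguard]
    rw [ih _ (fun x hx => h x (by simp [hx]))]
    simp [winRep, List.append_assoc]

theorem winBLoop_eq_winAF (cs0 : List Char) (inq0 : Bool) (arg0 : List Char) :
    winBLoop cs0 inq0 arg0 = winAF cs0 inq0 0 arg0 := by
  suffices h : ∀ n (cs : List Char), cs.length ≤ n → ∀ inq arg,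
      winBLoop cs inq arg = winAF cs inq 0 arg from
    h cs0.length cs0 le_rfl inq0 arg0
  intro n
  induction n with
  | zero =>
    intro cs hlen inq arg
    have : cs = [] := List.length_eq_zero_iff.mp (Nat.le_zero.mp hlen)
    subst this; simp [winBLoop, winAF, winRep]
  | succ n ih =>
    intro cs hlen inq arg
    match cs with
    | [] => simp [winBLoop, winAF, winRep]
    | c :: cs =>
      have hlen' : cs.length ≤ n := by simpa using hlen
      rw [winBLoop]
      by_cases h1 : c = '\\'
      · subst h1
        rw [if_pos rfl]
        have hsplit : cs = cs.takeWhile (· == '\\') ++ cs.dropWhile (· == '\\') :=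
          (List.takeWhile_append_dropWhile).symm
        have hA : winAF ('\\' :: cs) inq 0 arg
            = winAF (cs.dropWhile (· == '\\')) inq ((cs.takeWhile (· == '\\')).length + 1) arg := by
          conv_lhs => rw [hsplit, takeWhile_bs_replicate,
            show ('\\' :: (List.replicate (cs.takeWhile (· == '\\')).length '\\' ++ cs.dropWhile (· == '\\')))
              = List.replicate ((cs.takeWhile (· == '\\')).length + 1) '\\' ++ cs.dropWhile (· == '\\') from by
                rw [List.replicate_succ, List.cons_append]]
          rw [winAF_absorbBS, Nat.zero_add]
        rw [hA]
        have hdlen : (cs.dropWhile (· == '\\')).length ≤ n :=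
          le_trans (List.length_dropWhile_le _ _) hlen'
        by_cases hh : (cs.dropWhile (· == '\\')).head? = some '"'
        · rw [if_pos hh]
          obtain ⟨rt, hrt⟩ : ∃ rt, cs.dropWhile (· == '\\') = '"' :: rt := by
            cases hdw : cs.dropWhile (· == '\\') with
            | nil => rw [hdw] at hh; simp at hh
            | cons r rt => rw [hdw] at hh; simp at hh; exact ⟨rt, by rw [hh]⟩
          rw [hrt]
          have hrtlen : rt.length ≤ n := by rw [hrt] at hdlen; simp at hdlen; omega
          have hq1 : ('"' : Char) ≠ '\\' := by decide
          have hAq : ∀ (b : Nat) (a : List Char), winAF ('"' :: rt) inq b a =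
              if b % 2 = 1 then winAF rt inq 0 (a ++ winRep (b / 2) ++ ['"'])
              else winAF rt (!inq) 0 (a ++ winRep (b / 2)) := by
            intro b a
            simp only [winAF, if_neg hq1]
            simp
          rw [hAq]
          simp only [List.tail_cons]
          split_ifs <;> rw [ih rt hrtlen] <;> simp [winRep]
        · rw [if_neg hh]
          have hh2 : (cs.dropWhile (· == '\\')).head? ≠ some '\\' := by
            intro hx
            have := dropWhile_head?_false (· == '\\') cs _ hx
            simp at this
          rw [winAF_shiftBS _ _ _ _ hh2 hh, ih _ hdlen]
          rfl
      · rw [if_neg h1]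
        by_cases h2 : c = '"'
        · subst h2
          rw [if_pos rfl, ih cs hlen']
          simp [winAF, winRep]
        · rw [if_neg h2]
          by_cases h3 : inq = false ∧ (c = ' ' ∨ c = '\t')
          · rw [if_pos h3]
            obtain ⟨hq, hws⟩ := h3
            subst hq
            have hdl : (cs.dropWhile (fun ch => ch == ' ' || ch == '\t')).length ≤ n :=
              le_trans (List.length_dropWhile_le _ _) hlen'
            rw [ih _ hdl]
            have hA : winAF (c :: cs) false 0 arg =
                (if arg = [] then [] else [String.ofList arg]) ++ winAF cs false 0 [] := by
              rcases hws with h' | h' <;> subst h' <;>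
                by_cases ha : arg = [] <;> simp [winAF, ha, winRep]
            rw [hA]
            have hWS : winAF cs false 0 [] =
                winAF (cs.dropWhile (fun ch => ch == ' ' || ch == '\t')) false 0 [] := by
              conv_lhs => rw [show cs = cs.takeWhile (fun ch => ch == ' ' || ch == '\t')
                ++ cs.dropWhile (fun ch => ch == ' ' || ch == '\t') from
                (List.takeWhile_append_dropWhile).symm]
              exact winAF_absorbWS _ _ (fun x hx => by
                have := List.mem_takeWhile_imp hx; simpa using this)
            rw [hWS]
          · rw [if_neg h3]
            have hdl : (cs.dropWhile (fun ch => !(ch == '\\') && !(ch == '"')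
                && (inq || !(ch == ' ' || ch == '\t')))).length ≤ n :=
              le_trans (List.length_dropWhile_le _ _) hlen'
            rw [ih _ hdl]
            have hg : ¬((c = ' ' ∨ c = '\t') ∧ inq = false) := fun hx => h3 ⟨hx.2, hx.1⟩
            have hA : winAF (c :: cs) inq 0 arg = winAF cs inq 0 (arg ++ [c]) := by
              simp [winAF, if_neg h1, if_neg h2, if_neg hg, winRep]
            have hmem : ∀ x ∈ cs.takeWhile (fun ch => !(ch == '\\') && !(ch == '"')
                && (inq || !(ch == ' ' || ch == '\t'))),
                x ≠ '\\' ∧ x ≠ '"' ∧ (inq = true ∨ (x ≠ ' ' ∧ x ≠ '\t')) := by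
              intro x hx
              have hx2 := List.mem_takeWhile_imp hx
              simp only [Bool.and_eq_true, Bool.not_eq_true', beq_eq_false_iff_ne,
                Bool.or_eq_true] at hx2
              refine ⟨hx2.1.1, hx2.1.2, ?_⟩
              rcases hx2.2 with h' | h'
              · exact Or.inl h'
              · right
                simp only [Bool.or_eq_false_iff, beq_eq_false_iff_ne] at h'
                exact h'
            have hOrd : winAF cs inq 0 (arg ++ [c]) =
                winAF (cs.dropWhile (fun ch => !(ch == '\\') && !(ch == '"')
                  && (inq || !(ch == ' ' || ch == '\t')))) inq 0
                  ((arg ++ [c]) ++ cs.takeWhile (fun ch => !(ch == '\\') && !(ch == '"')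
                  && (inq || !(ch == ' ' || ch == '\t')))) := by
              conv_lhs => rw [show cs = cs.takeWhile (fun ch => !(ch == '\\') && !(ch == '"')
                  && (inq || !(ch == ' ' || ch == '\t')))
                ++ cs.dropWhile (fun ch => !(ch == '\\') && !(ch == '"')
                  && (inq || !(ch == ' ' || ch == '\t'))) from
                (List.takeWhile_append_dropWhile).symm]
              exact winAF_absorbOrd _ _ _ _ hmem
            rw [hA, hOrd]
            simp


theorem winFin_append (s : Bool × Nat × List Char) (xs ys : List Char) :
    winFin s (xs ++ ys) = winFin (winFin s xs) ys :=
  List.foldl_append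

theorem winSt_bs0 (s : Bool × Nat × List Char) (c : Char) (h : c ≠ '\\') :
    (winSt s c).2.1 = 0 := by
  simp only [winSt, if_neg h]
  split_ifs <;> rfl

theorem winSt_other (i : Bool) (b : Nat) (a : List Char) (c : Char)
    (h1 : c ≠ '\\') (h2 : c ≠ '"') :
    (winSt (i, b, a) c).1 = i ∧ (winSt (i, b, a) c).2.1 = 0 := by
  simp only [winSt, if_neg h1, if_neg h2]
  split_ifs <;> exact ⟨rfl, rfl⟩

theorem winFin_replicate_bs (n : Nat) (s : Bool × Nat × List Char) :
    winFin s (List.replicate n '\\') = (s.1, s.2.1 + n, s.2.2) := by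
  induction n generalizing s with
  | zero => simp [winFin]
  | succ n ih =>
    rw [List.replicate_succ]
    have hstep : winFin s ('\\' :: List.replicate n '\\')
        = winFin (winSt s '\\') (List.replicate n '\\') := rfl
    rw [hstep, ih]
    simp [winSt]
    omega

theorem winFin_last_bs0 (u : List Char) (x : Char) (s : Bool × Nat × List Char)
    (hlast : u.getLast? = some x) (hx : x ≠ '\\') :
    (winFin s u).2.1 = 0 := by
  obtain ⟨u', rfl⟩ : ∃ u', u = u' ++ [x] := List.getLast?_eq_some_iff.mp hlast
  rw [winFin_append]
  exact winSt_bs0 _ _ hx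

theorem winSt_quote (i : Bool) (b : Nat) (a : List Char) :
    (winSt (i, b, a) '"').2.1 = 0 ∧ ((winSt (i, b, a) '"').2.2 = [] ↔ (a = [] ∧ b = 0)) := by
  have h1 : ('"' : Char) ≠ '\\' := by decide
  by_cases hb : b % 2 = 1
  · have e2 : winSt (i, b, a) '"' = (i, 0, a ++ winRep (b / 2) ++ ['"']) := by
      simp [winSt, h1, hb]
    rw [e2]
    refine ⟨rfl, ?_⟩
    constructor
    · intro h; simp at h
    · rintro ⟨_, rfl⟩; simp at hb
  · have e2 : winSt (i, b, a) '"' = (!i, 0, a ++ winRep (b / 2)) := by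
      simp [winSt, h1, hb]
    rw [e2]
    refine ⟨rfl, ?_⟩
    simp only [winRep, List.append_eq_nil_iff, List.replicate_eq_nil_iff]
    constructor
    · rintro ⟨ha, h⟩; exact ⟨ha, by omega⟩
    · rintro ⟨ha, rfl⟩; exact ⟨ha, by omega⟩

theorem winFin_quotes_run (m : Nat) (i : Bool) (a : List Char) :
    ∃ i', winFin (i, 0, a) (List.replicate m '"') = (i', 0, a) := by
  induction m generalizing i with
  | zero => exact ⟨i, rfl⟩
  | succ m ih =>
    rw [List.replicate_succ]
    have hst : winSt (i, 0, a) '"' = (!i, 0, a) := by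
      simp [winSt, winRep]
    have hstep : winFin (i, 0, a) ('"' :: List.replicate m '"')
        = winFin (winSt (i, 0, a) '"') (List.replicate m '"') := rfl
    rw [hstep, hst]
    exact ih (!i)

theorem parity_flip (b : Nat) : (!decide (b % 2 = 1)) = decide ((b + 1) % 2 = 1) := by
  rcases Nat.mod_two_eq_zero_or_one b with h | h <;> simp [h, Nat.add_mod]

theorem pvQStep_winSt (u : List Char) (i : Bool) (b : Nat) (a : List Char) :
    u.foldl pvQStep (i, decide (b % 2 = 1)) =
      ((winFin (i, b, a) u).1, decide ((winFin (i, b, a) u).2.1 % 2 = 1)) := by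
  induction u generalizing i b a with
  | nil => rfl
  | cons c u ih =>
    have hstepA : winFin (i, b, a) (c :: u) = winFin (winSt (i, b, a) c) u := rfl
    have hstepQ : (c :: u).foldl pvQStep (i, decide (b % 2 = 1))
        = u.foldl pvQStep (pvQStep (i, decide (b % 2 = 1)) c) := rfl
    rw [hstepA, hstepQ]
    by_cases h1 : c = '\\'
    · subst h1
      have e1 : pvQStep (i, decide (b % 2 = 1)) '\\' = (i, decide ((b + 1) % 2 = 1)) := by
        simp [pvQStep, parity_flip]
      have e2 : winSt (i, b, a) '\\' = (i, b + 1, a) := by simp [winSt]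
      rw [e1, e2]
      exact ih i (b + 1) a
    · by_cases h2 : c = '"'
      · subst h2
        have h1' : ('"' : Char) ≠ '\\' := by decide
        by_cases hb : b % 2 = 1
        · have e1 : pvQStep (i, decide (b % 2 = 1)) '"' = (i, decide (0 % 2 = 1)) := by
            simp [pvQStep, hb]
          have e2 : winSt (i, b, a) '"' = (i, 0, a ++ winRep (b / 2) ++ ['"']) := by
            simp [winSt, hb]
          rw [e1, e2]
          exact ih i 0 _
        · have e1 : pvQStep (i, decide (b % 2 = 1)) '"' = (!i, decide (0 % 2 = 1)) := by
            simp [pvQStep, hb]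
          have e2 : winSt (i, b, a) '"' = (!i, 0, a ++ winRep (b / 2)) := by
            simp [winSt, hb]
          rw [e1, e2]
          exact ih (!i) 0 _
      · have e1 : pvQStep (i, decide (b % 2 = 1)) c = (i, decide (0 % 2 = 1)) := by
          simp [pvQStep, h1, h2]
        rw [e1]
        obtain ⟨hi, hbz⟩ := winSt_other i b a c h1 h2
        rcases hw : winSt (i, b, a) c with ⟨i0, b0, a0⟩
        rw [hw] at hi hbz
        simp only at hi hbz
        subst hi hbz
        exact ih i0 0 a0

theorem pvInQuotes_eq (u : List Char) :
    pvInQuotes u = (winFin (false, 0, []) u).1 := by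
  have h := pvQStep_winSt u false 0 []
  simp only [show decide (0 % 2 = 1) = false from rfl] at h
  unfold pvInQuotes
  rw [h]

theorem pvRstrip_append (l : List Char) (c : Char) :
    ∃ n, l = pvRstrip l c ++ List.replicate n c := by
  have h1 : l.reverse.takeWhile (· == c) = List.replicate (l.reverse.takeWhile (· == c)).length c :=
    List.eq_replicate_length.mpr (fun b hb => by
      have := List.mem_takeWhile_imp hb; simpa using this)
  have key : l = (l.reverse.dropWhile (· == c)).reverse ++ (l.reverse.takeWhile (· == c)).reverse := by
    conv_lhs => rw [← l.reverse_reverse,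
      ← List.takeWhile_append_dropWhile (p := (· == c)) (l := l.reverse)]
    rw [List.reverse_append]
  refine ⟨(l.reverse.takeWhile (· == c)).length, ?_⟩
  conv_lhs => rw [key]
  unfold pvRstrip
  congr 1
  rw [h1]
  simp

theorem pvRstrip_getLast? (l : List Char) (c : Char) (x : Char)
    (h : (pvRstrip l c).getLast? = some x) : x ≠ c := by
  unfold pvRstrip at h
  rw [List.getLast?_reverse] at h
  have := dropWhile_head?_false (· == c) l.reverse x h
  simpa using this

theorem D_iff_final (cmdline : String) :
    D_win_split cmdline ↔
      ((winFin (false, 0, []) cmdline.toList).2.2 = [] ∧ (winFin (false, 0, []) cmdline.toList).2.1 ≠ 0) := by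
  obtain ⟨n, hn⟩ := pvRstrip_append cmdline.toList '\\'
  obtain ⟨m, hm⟩ := pvRstrip_append (pvRstrip cmdline.toList '\\') '"'
  set l := cmdline.toList with hldef
  set p := pvRstrip l '\\' with hpdef
  set q := pvRstrip p '"' with hqdef
  have hF : winFin (false, 0, []) l =
      ((winFin (false, 0, []) p).1, (winFin (false, 0, []) p).2.1 + n, (winFin (false, 0, []) p).2.2) := by
    conv_lhs => rw [hn]
    rw [winFin_append, winFin_replicate_bs]
  have hbp : (winFin (false, 0, []) p).2.1 = 0 := by
    rcases eq_or_ne p [] with hpe | hpe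
    · rw [hpe]; rfl
    · obtain ⟨x, hx⟩ := Option.isSome_iff_exists.mp
        ((List.getLast?_isSome (l := p)).mpr hpe)
      exact winFin_last_bs0 p x _ hx (pvRstrip_getLast? l '\\' x hx)
  have hap : (winFin (false, 0, []) p).2.2 = [] ↔
      ((winFin (false, 0, []) q).2.2 = [] ∧ (winFin (false, 0, []) q).2.1 = 0) := by
    rcases Nat.eq_zero_or_pos m with hm0 | hm1
    · subst hm0
      have hpq : p = q := by simpa using hm
      constructor
      · intro h
        refine ⟨by rw [← hpq]; exact h, by rw [← hpq]; exact hbp⟩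
      · intro h
        rw [hpq]; exact h.1
    · obtain ⟨m', rfl⟩ : ∃ m', m = m' + 1 := ⟨m - 1, by omega⟩
      rw [List.replicate_succ] at hm
      rcases hq2 : winFin (false, 0, []) q with ⟨iq, bq, aq⟩
      rcases hw : winSt (iq, bq, aq) '"' with ⟨i1, b1, a1⟩
      obtain ⟨hb1, ha1⟩ := winSt_quote iq bq aq
      rw [hw] at hb1 ha1
      simp only at hb1 ha1
      subst hb1
      obtain ⟨i2, hrun⟩ := winFin_quotes_run m' i1 a1
      have hsq : winFin (false, 0, []) p = (i2, 0, a1) := by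
        rw [hm, winFin_append]
        have : winFin (winFin (false, 0, []) q) ('"' :: List.replicate m' '"')
            = winFin (winSt (winFin (false, 0, []) q) '"') (List.replicate m' '"') := rfl
        rw [this, hq2, hw]
        exact hrun
      rw [hsq]
      simpa using ha1
  have hq_char : ((winFin (false, 0, []) q).2.2 = [] ∧ (winFin (false, 0, []) q).2.1 = 0) ↔
      (q = [] ∨ ((q.getLast? = some ' ' ∨ q.getLast? = some '\t') ∧ pvInQuotes q.dropLast = false)) := by
    rcases List.eq_nil_or_concat q with hqe | ⟨q', x, hqx⟩
    · rw [hqe]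
      simp [winFin]
    · rw [List.concat_eq_append] at hqx
      have hxq : x ≠ '"' := pvRstrip_getLast? p '"' x (by
        rw [← hqdef, hqx]; simp)
      rw [hqx]
      have hstep : winFin (false, 0, []) (q' ++ [x]) = winSt (winFin (false, 0, []) q') x := by
        rw [winFin_append]; rfl
      rw [hstep, List.getLast?_concat, List.dropLast_concat, pvInQuotes_eq]
      rcases hS : winFin (false, 0, []) q' with ⟨iS, bS, aS⟩
      simp only
      by_cases hx1 : x = '\\'
      · subst hx1
        have hst : winSt (iS, bS, aS) '\\' = (iS, bS + 1, aS) := by simp [winSt]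
        rw [hst]
        apply iff_of_false
        · rintro ⟨_, hb⟩; simp at hb
        · rintro (h | ⟨h | h, _⟩)
          · exact absurd h (by simp)
          · simp at h
          · simp at h
      · by_cases hws : x = ' ' ∨ x = '\t'
        · by_cases hiS : iS = false
          · subst hiS
            have hst : winSt (false, bS, aS) x = (false, 0, []) := by
              rcases hws with h' | h' <;> subst h' <;> simp [winSt]
            rw [hst]
            apply iff_of_true
            · exact ⟨rfl, rfl⟩
            · right
              refine ⟨?_, rfl⟩
              rcases hws with h' | h' <;> subst h' <;> simp
          · have hiS' : iS = true := by revert hiS; cases iS <;> simp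
            subst hiS'
            have hg : ¬((x = ' ' ∨ x = '\t') ∧ (true : Bool) = false) := by
              rintro ⟨_, h⟩; simp at h
            have hst : winSt (true, bS, aS) x = (true, 0, aS ++ winRep bS ++ [x]) := by
              simp only [winSt, if_neg hx1, if_neg hxq, if_neg hg]
            rw [hst]
            apply iff_of_false
            · rintro ⟨ha, _⟩; simp at ha
            · rintro (h | ⟨_, h⟩)
              · exact absurd h (by simp)
              · simp at h
        · have hg : ¬((x = ' ' ∨ x = '\t') ∧ iS = false) := fun hx => hws hx.1
          have hst : winSt (iS, bS, aS) x = (iS, 0, aS ++ winRep bS ++ [x]) := by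
            simp only [winSt, if_neg hx1, if_neg hxq, if_neg hg]
          rw [hst]
          apply iff_of_false
          · rintro ⟨ha, _⟩; simp at ha
          · rintro (h | ⟨h | h, _⟩)
            · exact absurd h (by simp)
            · simp at h; exact hws (Or.inl h)
            · simp at h; exact hws (Or.inr h)
  have hbl : (winFin (false, 0, []) l).2.1 = n := by rw [hF]; simp [hbp]
  have hal : (winFin (false, 0, []) l).2.2 = (winFin (false, 0, []) p).2.2 := by rw [hF]
  have hnp : n ≠ 0 → p ≠ l := by
    intro hn0 hpl
    rw [hpl] at hn
    have := congrArg List.length hn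
    simp at this
    omega
  have hpn : p ≠ l → n ≠ 0 := by
    intro hpl hn0
    subst hn0
    simp at hn
    exact hpl hn.symm
  rw [D_expl cmdline]
  constructor
  · rintro ⟨hpl, hdisj⟩
    refine ⟨?_, ?_⟩
    · rw [hal]; exact hap.mpr (hq_char.mpr hdisj)
    · rw [hbl]; exact hpn hpl
  · rintro ⟨ha, hb⟩
    rw [hal] at ha
    rw [hbl] at hb
    exact ⟨hnp hb, hq_char.mp (hap.mp ha)⟩

-- ===== VERDICT (by name: the statement is the Claim_ definition above) =====
theorem win_split_spec : Claim_unchanged_win_split := by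
  intro cmdline _ hD
  have h := (D_iff_final cmdline).not.mp hD
  have : win_split_alt cmdline = win_split cmdline := by
    unfold win_split_alt win_split
    rw [winBLoop_eq_winAF, winAF_eq_winALoop]
    rw [if_neg h, List.append_nil]
  exact this.symm

theorem win_split_changed : Claim_changed_win_split := by
  unfold Claim_changed_win_split
  refine ⟨by decide, by decide, by decide, ?_, by decide⟩
  show win_split_alt "\\" = ["\\"]
  unfold win_split_alt
  rw [winBLoop_eq_winAF]
  decide

theorem win_split_tight : Claim_exact_win_split := by
  intro cmdline _ hD heq
  have h := (D_iff_final cmdline).mp hD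
  have hBA : win_split_alt cmdline = win_split cmdline ++ [String.ofList (winRep (winFin (false, 0, []) cmdline.toList).2.1)] := by
    unfold win_split_alt win_split
    rw [winBLoop_eq_winAF, winAF_eq_winALoop, if_pos h]
  have := congrArg List.length (heq.trans hBA)
  simp at this
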